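-- pv_equiv track=rewrite | github.com/yasharora102/automate-stuff-python | chap-4/coin_flip.py | streak_counter
-- ===== SOURCE A (Python) =====
-- def streak_counter(flip_list,numberOfStreaks):
--     internal_streak_count = 0
--     for j in range(len(flip_list)-1):
--         if flip_list[j] == flip_list[j+1]:
--             internal_streak_count += 1
--         else:
--             if internal_streak_count == 6:
--                 numberOfStreaks+=1
--             internal_streak_count=0
--     return numberOfStreaks
-- ===== SOURCE B (Python) =====
-- def streak_counter(flip_list, numberOfStreaks):
--     # Phase 1: run-length encode the list of flips.
--     runs = []
--     for flip in flip_list: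
--         if runs and runs[-1][0] == flip:
--             runs[-1][1] += 1
--         else:
--             runs.append([flip, 1])
--     # Phase 2: count runs of exactly 7 equal flips, the final run never counts
--     # (its end is never seen by a following unequal pair).
--     return numberOfStreaks + sum(1 for _, length in runs[:-1] if length == 7)
-- ===== Notes on version B (the rewrite author's own statement) =====
-- stated objective: alternative
-- what changed: Replaced A's running adjacent-pair streak counter with a two-phase run-length encoding: build the list of (flip, length) runs, then count the runs (excluding the final one, whose end no unequal pair follows) whose length is exactly 7.
import Mathlib
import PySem

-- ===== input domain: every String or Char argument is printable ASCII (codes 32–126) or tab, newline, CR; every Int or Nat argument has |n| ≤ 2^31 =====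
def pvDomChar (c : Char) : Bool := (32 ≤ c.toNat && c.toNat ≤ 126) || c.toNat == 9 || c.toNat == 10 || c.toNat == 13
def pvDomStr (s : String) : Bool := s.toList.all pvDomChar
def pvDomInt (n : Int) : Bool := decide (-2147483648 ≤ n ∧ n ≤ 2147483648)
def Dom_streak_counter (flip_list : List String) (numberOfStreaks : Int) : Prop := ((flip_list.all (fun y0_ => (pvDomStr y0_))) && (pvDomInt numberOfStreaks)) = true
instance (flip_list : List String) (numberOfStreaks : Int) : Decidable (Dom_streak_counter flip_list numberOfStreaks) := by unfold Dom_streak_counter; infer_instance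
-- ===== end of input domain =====

-- B replaces A's running adjacent-pair counter by a run-length encoding pass followed by a
-- filtered count of the non-final runs of length exactly 7 (objective: alternative decomposition).

-- ===== PORT A =====
-- loop body of A: state (internal_streak_count, numberOfStreaks), index j
def pvStepA (fl : List String) (st : Int × Int) (j : Int) : Int × Int :=
  if PySem.List.pyGetD fl j "" == PySem.List.pyGetD fl (j + 1) "" then (st.1 + 1, st.2)
  else (0, if st.1 == 6 then st.2 + 1 else st.2)

def streak_counter (flip_list : List String) (numberOfStreaks : Int) : Int :=
  ((PySem.List.pyRange 0 ((flip_list.length : Int) - 1) 1).foldl (pvStepA flip_list)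
    (0, numberOfStreaks)).2

-- ===== PORT B =====
-- B's phase-1 loop body: extend the last run or start a new one
def pvAddFlip (runs : List (String × Int)) (flip : String) : List (String × Int) :=
  match runs.getLast? with
  | some (s, c) => if s == flip then runs.dropLast ++ [(s, c + 1)] else runs ++ [(flip, 1)]
  | none => [(flip, 1)]

def streak_counter_alt (flip_list : List String) (numberOfStreaks : Int) : Int :=
  let runs := flip_list.foldl pvAddFlip []
  numberOfStreaks + ((runs.dropLast.countP (fun p => p.2 == 7) : Nat) : Int)

-- ===== PRECONDITION & SPEC =====
def Spec_streak_counter (flip_list : List String) (numberOfStreaks : Int) (out : Int) : Prop := out = streak_counter_alt flip_list numberOfStreaks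
instance (flip_list : List String) (numberOfStreaks : Int) (out : Int) : Decidable (Spec_streak_counter flip_list numberOfStreaks out) := by unfold Spec_streak_counter; infer_instance

-- ===== CLAIM (what is proved, stated in full; the proofs are below) =====
def Claim_equal_streak_counter : Prop := ∀ (flip_list : List String) (numberOfStreaks : Int), Dom_streak_counter flip_list numberOfStreaks → Spec_streak_counter flip_list numberOfStreaks (streak_counter flip_list numberOfStreaks)

-- ===== LEMMAS AND PROOFS =====

-- structural reformulation of A's indexed loop
def loopA : List String → Int → Int → Int
  | [], _, n => n
  | [_], _, n => n
  | x :: y :: xs, ic, n =>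
    if x == y then loopA (y :: xs) (ic + 1) n
    else loopA (y :: xs) 0 (if ic == 6 then n + 1 else n)

lemma pyGetD_cons_succ (x : String) (l : List String) (i : Int) (d : String) (h : 0 ≤ i) :
    PySem.List.pyGetD (x :: l) (i + 1) d = PySem.List.pyGetD l i d := by
  rw [PySem.List.pyGetD_of_nonneg _ _ (by omega : (0:Int) ≤ i + 1),
    PySem.List.pyGetD_of_nonneg _ _ h]
  have : (i + 1).toNat = i.toNat + 1 := by omega
  simp [this]

lemma stepA_cons (x : String) (l : List String) (st : Int × Int) (j : Int) (h : 0 ≤ j) :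
    pvStepA (x :: l) st (j + 1) = pvStepA l st j := by
  unfold pvStepA
  rw [pyGetD_cons_succ x l j _ h, show j + 1 + 1 = (j + 1) + 1 from rfl,
    pyGetD_cons_succ x l (j + 1) _ (by omega)]

lemma foldA_shift (x : String) (l : List String) :
    ∀ (k : Nat) (a : Int) (st : Int × Int), 0 ≤ a →
      (PySem.List.pyRange (a + 1) (a + 1 + k) 1).foldl (pvStepA (x :: l)) st
        = (PySem.List.pyRange a (a + k) 1).foldl (pvStepA l) st := by
  intro k
  induction k with
  | zero =>
    intro a st _
    rw [PySem.List.pyRange_one_eq_nil (by omega), PySem.List.pyRange_one_eq_nil (by omega)]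
    rfl
  | succ k ih =>
    intro a st ha
    rw [PySem.List.pyRange_one_cons (show a + 1 < a + 1 + ((k + 1 : Nat) : Int) by push_cast; omega),
      PySem.List.pyRange_one_cons (show a < a + ((k + 1 : Nat) : Int) by push_cast; omega)]
    simp only [List.foldl_cons]
    rw [stepA_cons x l st a ha]
    rw [show a + 1 + ((k + 1 : Nat) : Int) = (a + 1) + 1 + (k : Int) by push_cast; ring,
      show a + ((k + 1 : Nat) : Int) = (a + 1) + (k : Int) by push_cast; ring]
    exact ih (a + 1) _ (by omega)

lemma foldA_eq_loopA : ∀ (l : List String) (x : String) (ic n : Int),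
    ((PySem.List.pyRange 0 (((x :: l).length : Int) - 1) 1).foldl (pvStepA (x :: l)) (ic, n)).2
      = loopA (x :: l) ic n := by
  intro l
  induction l with
  | nil =>
    intro x ic n
    simp [PySem.List.pyRange_one_eq_nil, loopA]
  | cons y l' ih =>
    intro x ic n
    have hlen : (((x :: y :: l').length : Int)) - 1 = (l'.length : Int) + 1 := by
      simp
    rw [hlen, PySem.List.pyRange_one_cons (by omega)]
    simp only [List.foldl_cons]
    have hst : pvStepA (x :: y :: l') (ic, n) 0
        = if x == y then ((ic + 1 : Int), n) else ((0 : Int), if ic == 6 then n + 1 else n) := by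
      unfold pvStepA
      rw [PySem.List.pyGetD_zero_cons, show (0 : Int) + 1 = 0 + 1 from rfl,
        pyGetD_cons_succ x (y :: l') 0 _ le_rfl, PySem.List.pyGetD_zero_cons]
    have hshift : ∀ st : Int × Int,
        (PySem.List.pyRange (0 + 1) (0 + 1 + ((l'.length : Nat) : Int)) 1).foldl
            (pvStepA (x :: y :: l')) st
          = (PySem.List.pyRange 0 (0 + ((l'.length : Nat) : Int)) 1).foldl (pvStepA (y :: l')) st :=
      fun st => foldA_shift x (y :: l') l'.length 0 st le_rfl
    rw [hst, show ((l'.length : Int) + 1) = 0 + 1 + ((l'.length : Nat) : Int) by ring]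
    by_cases hxy : x == y
    · simp only [hxy, if_true]
      rw [hshift, show (0 : Int) + ((l'.length : Nat) : Int) = (((y :: l').length : Int)) - 1 by
        simp, ih y (ic + 1) n]
      simp [loopA, hxy]
    · simp only [hxy, Bool.false_eq_true, if_false]
      rw [hshift, show (0 : Int) + ((l'.length : Nat) : Int) = (((y :: l').length : Int)) - 1 by
        simp, ih y 0 _]
      simp [loopA, hxy]

lemma addFlip_singleton (s : String) (c : Int) (f : String) :
    pvAddFlip [(s, c)] f = if s == f then [(s, c + 1)] else [(s, c), (f, 1)] := by
  unfold pvAddFlip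
  simp only [List.getLast?_singleton]
  split <;> simp_all

lemma addFlip_ne_nil (rs : List (String × Int)) (f : String) : pvAddFlip rs f ≠ [] := by
  unfold pvAddFlip
  split
  · split <;> simp
  · simp

lemma foldl_addFlip_ne_nil : ∀ (xs : List String) (rs : List (String × Int)),
    rs ≠ [] → List.foldl pvAddFlip rs xs ≠ [] := by
  intro xs
  induction xs with
  | nil => intro rs h; simpa using h
  | cons x xs ih =>
    intro rs h
    simpa using ih (pvAddFlip rs x) (addFlip_ne_nil rs x)

lemma addFlip_append (rs : List (String × Int)) (p : String × Int) (f : String) :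
    pvAddFlip (rs ++ [p]) f = rs ++ pvAddFlip [p] f := by
  cases p with
  | mk s c =>
    unfold pvAddFlip
    simp only [List.getLast?_append, List.getLast?_singleton, Option.some_or]
    split <;> simp

lemma foldl_addFlip_append : ∀ (xs : List String) (rs : List (String × Int)) (p : String × Int),
    List.foldl pvAddFlip (rs ++ [p]) xs = rs ++ List.foldl pvAddFlip [p] xs := by
  intro xs
  induction xs with
  | nil => intro rs p; simp
  | cons x xs ih =>
    intro rs p
    obtain ⟨s, c⟩ := p
    simp only [List.foldl_cons]
    rw [addFlip_append, addFlip_singleton]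
    by_cases hs : s == x
    · simp only [hs, if_true]
      rw [ih rs (s, c + 1)]
    · simp only [hs, Bool.false_eq_true, if_false]
      rw [show rs ++ [(s, c), (x, 1)] = (rs ++ [(s, c)]) ++ [(x, 1)] by simp,
        ih (rs ++ [(s, c)]) (x, 1),
        show ([(s, c), (x, 1)] : List (String × Int)) = [(s, c)] ++ [(x, 1)] from rfl,
        ih [(s, c)] (x, 1)]
      simp

-- the key invariant: A's structural loop with current-run counter c-1 computes B's count
lemma loopA_eq_count : ∀ (xs : List String) (x : String) (c n : Int),
    loopA (x :: xs) (c - 1) n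
      = n + (((List.foldl pvAddFlip [(x, c)] xs).dropLast.countP (fun p => p.2 == 7) : Nat) : Int) := by
  intro xs
  induction xs with
  | nil => intro x c n; simp [loopA]
  | cons y xs ih =>
    intro x c n
    by_cases hxy : x == y
    · have hx : x = y := by simpa using hxy
      simp only [List.foldl_cons, addFlip_singleton, hxy, if_true]
      rw [show loopA (x :: y :: xs) (c - 1) n = loopA (y :: xs) (c - 1 + 1) n by
        simp [loopA, hxy]]
      rw [show c - 1 + 1 = c + 1 - 1 by ring, hx]
      exact ih y (c + 1) n
    · simp only [List.foldl_cons, addFlip_singleton, hxy, Bool.false_eq_true, if_false]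
      rw [show loopA (x :: y :: xs) (c - 1) n
          = loopA (y :: xs) 0 (if c - 1 == 6 then n + 1 else n) by simp [loopA, hxy]]
      rw [show (0 : Int) = 1 - 1 by ring, ih y 1 _]
      rw [show ([(x, c), (y, 1)] : List (String × Int)) = [(x, c)] ++ [(y, 1)] from rfl,
        foldl_addFlip_append]
      rw [List.dropLast_append_of_ne_nil (foldl_addFlip_ne_nil xs [(y, 1)] (by simp))]
      rw [List.singleton_append, List.countP_cons]
      by_cases hc : c = 7
      · simp only [hc, show ((7 : Int) - 1 == 6) = true from rfl]
        simp; omega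
      · have h6 : ((c - 1) == 6) = false := by simp; omega
        have h7 : ((c == 7) : Bool) = false := by simp [hc]
        simp only [h6, h7, Bool.false_eq_true, if_false]
        simp

-- ===== VERDICT (by name: the statement is the Claim_ definition above) =====
theorem streak_counter_spec : Claim_equal_streak_counter := by
  intro flip_list n _
  unfold Spec_streak_counter streak_counter streak_counter_alt
  cases flip_list with
  | nil => simp [PySem.List.pyRange_one_eq_nil]
  | cons x xs =>
    simp only [List.foldl_cons]
    rw [show pvAddFlip [] x = [(x, 1)] from rfl]
    rw [foldA_eq_loopA xs x 0 n]
    rw [show (0 : Int) = 1 - 1 by ring, loopA_eq_count xs x 1 n]
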